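-- pv_equiv track=rewrite | github.com/momchil-lukanov/hack-bulgaria | Programming0-to-check/week4/winter-is-coming/winter.py | winter_is_coming
-- ===== SOURCE A (Python) =====
-- def winter_is_coming(seasons):
--
--     counter = 0
--
--     for season in seasons:
--         if season == "winter":
--             counter = 0
--         elif season != "winter":
--             counter += 1
--
--     return counter == 5
-- ===== SOURCE B (Python) =====
-- def winter_is_coming(seasons):
--     counter = 0
--     for season in reversed(seasons):
--         if season == "winter":
--             break
--         counter += 1
--     return counter == 5
-- ===== Notes on version B (the rewrite author's own statement) =====
-- stated objective: alternative
-- what changed: B scans the list backwards and stops at the last 'winter', counting the trailing non-winter run, instead of A's full forward scan that resets a counter at each winter.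
import Mathlib
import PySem

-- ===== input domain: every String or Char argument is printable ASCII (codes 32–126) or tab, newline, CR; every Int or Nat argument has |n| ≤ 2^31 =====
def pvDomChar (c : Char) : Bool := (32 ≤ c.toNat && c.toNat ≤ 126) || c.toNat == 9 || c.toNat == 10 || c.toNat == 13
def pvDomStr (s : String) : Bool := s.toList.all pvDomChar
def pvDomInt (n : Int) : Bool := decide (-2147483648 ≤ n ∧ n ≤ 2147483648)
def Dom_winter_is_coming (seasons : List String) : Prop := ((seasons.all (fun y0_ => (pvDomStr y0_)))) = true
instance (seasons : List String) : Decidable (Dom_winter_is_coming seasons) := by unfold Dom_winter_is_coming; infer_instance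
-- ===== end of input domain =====

-- B scans backwards stopping at the last "winter"; A scans forwards resetting a counter. Same return value; objective: alternative decomposition.

-- ===== PORT A =====
-- forward fold: counter resets to 0 on "winter", else +1
def winter_is_coming (seasons : List String) : Bool :=
  (seasons.foldl (fun counter season =>
      if season = "winter" then 0
      else if season ≠ "winter" then counter + 1
      else counter) (0 : Int)) == 5

-- ===== PORT B =====
-- backward scan with early break: count until the first "winter" of the reversed list
def winterRevCount : List String → Int
  | [] => 0
  | season :: rest => if season = "winter" then 0 else winterRevCount rest + 1

def winter_is_coming_alt (seasons : List String) : Bool :=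
  winterRevCount seasons.reverse == 5

-- ===== PRECONDITION & SPEC =====
def Spec_winter_is_coming (seasons : List String) (out : Bool) : Prop := out = winter_is_coming_alt seasons
instance (seasons : List String) (out : Bool) : Decidable (Spec_winter_is_coming seasons out) := by unfold Spec_winter_is_coming; infer_instance

-- ===== CLAIM (what is proved, stated in full; the proofs are below) =====
def Claim_equal_winter_is_coming : Prop := ∀ (seasons : List String), Dom_winter_is_coming seasons → Spec_winter_is_coming seasons (winter_is_coming seasons)

-- ===== LEMMAS AND PROOFS =====

theorem winterRevCount_append_of_mem (l m : List String) (h : "winter" ∈ l) :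
    winterRevCount (l ++ m) = winterRevCount l := by
  induction l with
  | nil => cases h
  | cons s t ih =>
    simp only [List.cons_append, winterRevCount]
    by_cases hs : s = "winter"
    · simp [hs]
    · have ht : "winter" ∈ t := by
        rcases List.mem_cons.mp h with h1 | h1
        · exact absurd h1.symm hs
        · exact h1
      simp [hs, ih ht]

theorem winterRevCount_append_of_not_mem (l m : List String) (h : "winter" ∉ l) :
    winterRevCount (l ++ m) = l.length + winterRevCount m := by
  induction l with
  | nil => simp
  | cons s t ih =>
    have hs : s ≠ "winter" := fun hh => h (hh ▸ List.mem_cons_self)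
    have ht : "winter" ∉ t := fun hh => h (List.mem_cons_of_mem _ hh)
    simp [winterRevCount, hs, ih ht]; ring

theorem winterRevCount_of_not_mem (l : List String) (h : "winter" ∉ l) :
    winterRevCount l = l.length := by
  have := winterRevCount_append_of_not_mem l [] h
  simpa [winterRevCount] using this

theorem foldl_counter_eq (l : List String) : ∀ c : Int,
    l.foldl (fun counter season =>
      if season = "winter" then 0
      else if season ≠ "winter" then counter + 1
      else counter) c =
    (if "winter" ∈ l then winterRevCount l.reverse else c + l.length) := by
  induction l with
  | nil => intro c; simp
  | cons s t ih =>
    intro c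
    simp only [List.foldl_cons, List.reverse_cons]
    by_cases hs : s = "winter"
    · subst hs
      rw [if_pos List.mem_cons_self]
      simp only [if_true]
      rw [ih 0]
      by_cases ht : "winter" ∈ t
      · rw [if_pos ht, winterRevCount_append_of_mem _ _ (by simpa using ht)]
      · have htr : "winter" ∉ t.reverse := by simpa using ht
        rw [if_neg ht, winterRevCount_append_of_not_mem _ _ htr]
        simp [winterRevCount]
    · rw [if_neg hs, if_pos hs, ih (c + 1)]
      by_cases ht : "winter" ∈ t
      · rw [if_pos ht, if_pos (List.mem_cons_of_mem _ ht),
          winterRevCount_append_of_mem _ _ (by simpa using ht)]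
      · have hm : "winter" ∉ s :: t := by
          intro hh; rcases List.mem_cons.mp hh with h1 | h1
          · exact hs h1.symm
          · exact ht h1
        rw [if_neg ht, if_neg hm]
        simp; ring

-- ===== VERDICT (by name: the statement is the Claim_ definition above) =====
theorem winter_is_coming_spec : Claim_equal_winter_is_coming := by
  intro seasons _
  unfold Spec_winter_is_coming winter_is_coming winter_is_coming_alt
  rw [foldl_counter_eq]
  by_cases h : "winter" ∈ seasons
  · rw [if_pos h]
  · have hr : "winter" ∉ seasons.reverse := by simpa using h
    rw [if_neg h, winterRevCount_of_not_mem _ hr]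
    simp
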